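-- pv_equiv track=rewrite | github.com/RevelationOrange/ff14Tools | programs/ffxivToolsLib.py | repairQuotes
-- ===== SOURCE A (Python) =====
-- def repairQuotes(x):
--     indices = []
--     for i in range(len(x)):
--         if x[i].count("\"")%2:
--             indices.append(i)
--     melds = [[indices[i*2], indices[i*2 + 1]] for i in range(int(len(indices)/2))]
--     for pair in list(reversed(melds)):
--         y = x.pop(pair[1])
--         x[pair[0]] += "," + y
--     return x
-- ===== SOURCE B (Python) =====
-- def repairQuotes(x):
--     res = []
--     open_idx = None
--     for s in x:
--         if s.count('"') % 2:
--             if open_idx is None: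
--                 open_idx = len(res)
--                 res.append(s)
--             else:
--                 res[open_idx] = res[open_idx] + "," + s
--                 open_idx = None
--         else:
--             res.append(s)
--     x[:] = res
--     return x
-- ===== Notes on version B (the rewrite author's own statement) =====
-- stated objective: simpler
-- what changed: Replaces A's three phases (collect indices of odd-quote elements, pair them up via range arithmetic, then pop-and-concatenate right-to-left with shifting indices) by one forward pass that keeps the index of the currently open unmatched element and merges in place while building the result.
import Mathlib
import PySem

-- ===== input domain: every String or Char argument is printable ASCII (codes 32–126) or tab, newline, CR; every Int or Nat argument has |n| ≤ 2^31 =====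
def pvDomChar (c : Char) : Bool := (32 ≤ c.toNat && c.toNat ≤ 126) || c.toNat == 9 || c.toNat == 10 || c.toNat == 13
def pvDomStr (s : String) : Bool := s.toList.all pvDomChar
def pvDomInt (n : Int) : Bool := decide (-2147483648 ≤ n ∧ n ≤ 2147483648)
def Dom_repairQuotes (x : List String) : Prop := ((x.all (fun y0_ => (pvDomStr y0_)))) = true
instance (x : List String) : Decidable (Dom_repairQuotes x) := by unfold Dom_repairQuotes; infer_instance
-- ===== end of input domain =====

-- B replaces A's three phases (collect odd-quote indices, pair them by range arithmetic, pop-and-concat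
-- right-to-left) by one forward pass keeping the index of the currently open unmatched element (objective:
-- simpler).  Both Pythons mutate x in place to the same final list and return it; the equivalence proved
-- here is about the return value.

-- ===== PORT A =====
def repairQuotes (x : List String) : List String :=
  let indices : List Nat :=
    (List.range x.length).foldl
      (fun acc i => if PySem.Str.count (x.getD i "") "\"" % 2 ≠ 0 then acc ++ [i] else acc) []
  let melds : List (Nat × Nat) :=
    (List.range (indices.length / 2)).map
      (fun i => (indices.getD (i * 2) 0, indices.getD (i * 2 + 1) 0))
  melds.reverse.foldl
    (fun l pair =>
      match PySem.List.pop? l (pair.2 : Int) with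
      | some (y, l') => l'.set pair.1 (l'.getD pair.1 "" ++ "," ++ y)
      | none => l) x  -- pop? never returns none here: pair.2 is always a valid index

-- ===== PORT B =====
def repairQuotes_alt (x : List String) : List String :=
  (x.foldl (fun st s =>
      if PySem.Str.count s "\"" % 2 ≠ 0 then
        match st.2 with
        | none => (st.1 ++ [s], some st.1.length)
        | some k => (st.1.set k (st.1.getD k "" ++ "," ++ s), none)
      else (st.1 ++ [s], st.2))
    (([] : List String), (none : Option Nat))).1

-- ===== PRECONDITION & SPEC =====
def Spec_repairQuotes (x : List String) (out : List String) : Prop := out = repairQuotes_alt x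
instance (x : List String) (out : List String) : Decidable (Spec_repairQuotes x out) := by unfold Spec_repairQuotes; infer_instance

-- ===== CLAIM (what is proved, stated in full; the proofs are below) =====
def Claim_equal_repairQuotes : Prop := ∀ (x : List String), Dom_repairQuotes x → Spec_repairQuotes x (repairQuotes x)

-- ===== LEMMAS AND PROOFS =====

-- The common specification: merge each odd-quote-count element with the next odd-quote-count element.
mutual
def pvMergeOpen (s : String) (mid : List String) : List String → List String
  | [] => s :: mid
  | u :: rest =>
    if PySem.Str.count u "\"" % 2 ≠ 0 then (s ++ "," ++ u) :: (mid ++ pvMerge rest)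
    else pvMergeOpen s (mid ++ [u]) rest
def pvMerge : List String → List String
  | [] => []
  | s :: xs => if PySem.Str.count s "\"" % 2 ≠ 0 then pvMergeOpen s [] xs else s :: pvMerge xs
end

-- A-side abstractions: the index list, its pairing, and the pop-and-concat step.
def pvIdx : List String → List Nat
  | [] => []
  | s :: xs => (if PySem.Str.count s "\"" % 2 ≠ 0 then [0] else []) ++ (pvIdx xs).map (· + 1)

def pvPairUp : List Nat → List (Nat × Nat)
  | a :: b :: r => (a, b) :: pvPairUp r
  | _ => []

def pvStep (l : List String) (pair : Nat × Nat) : List String :=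
  match PySem.List.pop? l (pair.2 : Int) with
  | some (y, l') => l'.set pair.1 (l'.getD pair.1 "" ++ "," ++ y)
  | none => l

def pvApply (l : List String) (ps : List (Nat × Nat)) : List String :=
  ps.foldr (fun p acc => pvStep acc p) l

theorem pvIdx_eq (x : List String) :
    (List.range x.length).filter
      (fun i => decide (PySem.Str.count (x.getD i "") "\"" % 2 ≠ 0)) = pvIdx x := by
  induction x with
  | nil => rfl
  | cons s xs ih =>
    rw [List.length_cons, List.range_succ_eq_map, List.filter_cons, List.filter_map]
    simp only [List.getD_cons_zero, List.getD_cons_succ, Function.comp_def, pvIdx]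
    rw [← ih]
    split <;> rename_i h <;> simp at h <;> simp [h]

theorem pvMelds_eq (ind : List Nat) :
    (List.range (ind.length / 2)).map
      (fun i => (ind.getD (i * 2) 0, ind.getD (i * 2 + 1) 0)) = pvPairUp ind := by
  induction ind using pvPairUp.induct with
  | case1 a b r ih =>
    have hlen : (a :: b :: r).length / 2 = r.length / 2 + 1 := by
      simp [List.length_cons]; omega
    rw [hlen, List.range_succ_eq_map, List.map_cons, List.map_map]
    simp only [Function.comp_def]
    have : (fun i => ((a :: b :: r).getD (Nat.succ i * 2) 0, (a :: b :: r).getD (Nat.succ i * 2 + 1) 0))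
        = (fun i => (r.getD (i * 2) 0, r.getD (i * 2 + 1) 0)) := by
      funext i
      have h1 : Nat.succ i * 2 = i * 2 + 2 := by omega
      rw [h1]
      simp
    rw [this, ih]
    simp [pvPairUp]
  | case2 l h =>
    cases l with
    | nil => rfl
    | cons a t =>
      cases t with
      | nil => simp [pvPairUp]
      | cons b r => exact absurd rfl (h a b r)
theorem pvPairUp_map (k : Nat) (l : List Nat) :
    pvPairUp (l.map (· + k)) = (pvPairUp l).map (fun p => (p.1 + k, p.2 + k)) := by
  induction l using pvPairUp.induct with
  | case1 a b r ih => simp [pvPairUp, ih]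
  | case2 l h =>
    cases l with
    | nil => rfl
    | cons a t =>
      cases t with
      | nil => rfl
      | cons b r => exact absurd rfl (h a b r)

theorem pvPopNone (pre m : List String) (b : Nat) (hb : ¬ b < m.length) :
    PySem.List.pop? (pre ++ m) ((b + pre.length : Nat) : Int) = none := by
  simp only [PySem.List.pop?, PySem.List.pyIdx?]
  rw [Option.bind_eq_none_iff]
  intro a h
  split_ifs at h with h1 h2
  all_goals exfalso
  all_goals first | (simp at h2; omega) | omega

theorem pvEraseApp (pre m : List String) (b : Nat) :
    (pre ++ m).eraseIdx (b + pre.length) = pre ++ m.eraseIdx b := by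
  induction pre with
  | nil => simp
  | cons p ps ih =>
    simp only [List.cons_append]
    have : b + (p :: ps).length = (b + ps.length) + 1 := by simp; omega
    rw [this, List.eraseIdx_cons_succ, ih]

theorem pop?_append_nat (pre m : List String) (b : Nat) :
    PySem.List.pop? (pre ++ m) ((b + pre.length : Nat) : Int)
      = (PySem.List.pop? m (b : Int)).map (fun r => (r.1, pre ++ r.2)) := by
  by_cases hb : b < m.length
  · have e1 : (b + pre.length) - pre.length = b := by omega
    rw [PySem.List.pop?_natCast _ _ (by simp; omega), PySem.List.pop?_natCast _ _ hb]
    rw [List.getElem_append_right (by omega), pvEraseApp]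
    simp [e1]
  · have h1 : PySem.List.pop? m (b : Int) = none := by
      simp only [PySem.List.pop?, PySem.List.pyIdx?]
      rw [Option.bind_eq_none_iff]
      intro a h
      split_ifs at h with h1 h2
      all_goals exfalso
      all_goals first | (simp at h2; omega) | omega
    rw [h1, pvPopNone _ _ _ hb]; rfl

theorem pvStep_append (pre m : List String) (a b : Nat) :
    pvStep (pre ++ m) (a + pre.length, b + pre.length) = pre ++ pvStep m (a, b) := by
  unfold pvStep
  simp only [pop?_append_nat]
  cases hp : PySem.List.pop? m (b : Int) with
  | none => rfl
  | some r =>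
    obtain ⟨y, l'⟩ := r
    simp only [Option.map_some]
    have hg : (pre ++ l').getD (a + pre.length) "" = l'.getD a "" := by
      rw [List.getD_eq_getElem?_getD, List.getD_eq_getElem?_getD,
        List.getElem?_append_right (by omega)]
      congr 2; omega
    rw [hg]
    rw [List.set_append_right _ _ (by omega)]
    congr 2; omega

theorem pvApply_append (ps : List (Nat × Nat)) (pre m : List String) :
    pvApply (pre ++ m) (ps.map (fun p => (p.1 + pre.length, p.2 + pre.length)))
      = pre ++ pvApply m ps := by
  induction ps with
  | nil => rfl
  | cons p ps ih =>
    simp only [List.map_cons, pvApply, List.foldr_cons]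
    rw [show (ps.map (fun p => (p.1 + pre.length, p.2 + pre.length))).foldr
          (fun p acc => pvStep acc p) (pre ++ m)
        = pvApply (pre ++ m) (ps.map (fun p => (p.1 + pre.length, p.2 + pre.length))) from rfl,
      ih]
    exact pvStep_append pre (pvApply m ps) p.1 p.2

theorem pvOpenAux (xs : List String) :
    ∀ (mid : List String) (s : String),
    (∀ r : List String, r.length ≤ xs.length → pvApply r (pvPairUp (pvIdx r)) = pvMerge r) →
    pvApply (s :: (mid ++ xs)) (pvPairUp (0 :: (pvIdx xs).map (· + (mid.length + 1))))
      = pvMergeOpen s mid xs := by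
  induction xs with
  | nil =>
    intro mid s _
    simp [pvIdx, pvPairUp, pvApply, pvMergeOpen]
  | cons u rest ih =>
    intro mid s hmain
    have hmain' : ∀ r : List String, r.length ≤ rest.length →
        pvApply r (pvPairUp (pvIdx r)) = pvMerge r := by
      intro r hr; exact hmain r (by simp; omega)
    by_cases hu : PySem.Str.count u "\"" % 2 ≠ 0
    · -- u closes the open element
      rw [pvMergeOpen]
      rw [if_pos hu]
      have hidx : (pvIdx (u :: rest)).map (· + (mid.length + 1))
          = (mid.length + 1) :: (pvIdx rest).map (· + (mid.length + 2)) := by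
        rw [pvIdx, if_pos hu]
        simp only [List.singleton_append, List.map_cons, List.map_map, Function.comp_def]
        refine List.cons_eq_cons.mpr ⟨by omega, List.map_congr_left (fun x _ => by omega)⟩
      rw [hidx, pvPairUp, pvPairUp_map]
      have hpre : (s :: (mid ++ [u])).length = mid.length + 2 := by simp
      have happ : pvApply (s :: (mid ++ u :: rest))
          ((pvPairUp (pvIdx rest)).map (fun p => (p.1 + (mid.length + 2), p.2 + (mid.length + 2))))
          = (s :: (mid ++ [u])) ++ pvMerge rest := by
        rw [show s :: (mid ++ u :: rest) = (s :: (mid ++ [u])) ++ rest by simp, ← hpre,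
          pvApply_append, hmain' rest (le_refl _)]
      rw [show pvApply (s :: (mid ++ u :: rest))
            ((0, mid.length + 1) :: (pvPairUp (pvIdx rest)).map (fun p => (p.1 + (mid.length + 2), p.2 + (mid.length + 2))))
          = pvStep (pvApply (s :: (mid ++ u :: rest))
              ((pvPairUp (pvIdx rest)).map (fun p => (p.1 + (mid.length + 2), p.2 + (mid.length + 2)))))
              (0, mid.length + 1) from rfl, happ]
      -- now compute the single step
      rw [show (s :: (mid ++ [u])) ++ pvMerge rest = (s :: mid) ++ (u :: pvMerge rest) by simp]
      unfold pvStep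
      rw [show ((0 : Nat), mid.length + 1).2 = mid.length + 1 from rfl]
      rw [show ((mid.length + 1 : Nat) : Int) = ((0 + (s :: mid).length : Nat) : Int) by simp]
      rw [pop?_append_nat]
      simp [PySem.List.pop?_zero_cons]
    · -- u stays in the middle
      rw [pvMergeOpen, if_neg hu]
      have hidx : (pvIdx (u :: rest)).map (· + (mid.length + 1))
          = (pvIdx rest).map (· + ((mid ++ [u]).length + 1)) := by
        rw [pvIdx, if_neg hu]
        simp only [List.nil_append, List.map_map, Function.comp_def, List.length_append]
        exact List.map_congr_left (fun x _ => by simp; omega)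
      rw [hidx, show s :: (mid ++ u :: rest) = s :: ((mid ++ [u]) ++ rest) by simp]
      exact ih (mid ++ [u]) s hmain'

theorem pvA_merge_aux (n : Nat) : ∀ x : List String, x.length ≤ n →
    pvApply x (pvPairUp (pvIdx x)) = pvMerge x := by
  induction n with
  | zero =>
    intro x hx
    have : x = [] := List.length_eq_zero_iff.mp (by omega)
    subst this; rfl
  | succ n ihn =>
    intro x hx
    cases x with
    | nil => rfl
    | cons s xs =>
      by_cases hs : PySem.Str.count s "\"" % 2 ≠ 0
      · rw [pvMerge, if_pos hs, pvIdx, if_pos hs]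
        have := pvOpenAux xs [] s (fun r hr => ihn r (by simp at hx; omega))
        simpa using this
      · rw [pvMerge, if_neg hs, pvIdx, if_neg hs]
        simp only [List.nil_append]
        rw [show (fun x => x + 1) = (fun x => x + ([s] : List String).length) by simp,
          pvPairUp_map, show ((s :: xs) : List String) = [s] ++ xs from rfl,
          show (([s] : List String).length) = 1 by simp]
        rw [show (1 : Nat) = ([s] : List String).length by simp, pvApply_append]
        rw [ihn xs (by simp at hx; omega)]
        rfl

theorem pvA_merge (x : List String) : pvApply x (pvPairUp (pvIdx x)) = pvMerge x :=
  pvA_merge_aux x.length x (le_refl _)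

theorem pvA_eq (x : List String) : repairQuotes x = pvMerge x := by
  unfold repairQuotes
  rw [PySem.List.foldl_append_ite_eq_filter]
  simp only [List.nil_append]
  rw [pvIdx_eq, pvMelds_eq, List.foldl_reverse, ← pvA_merge]
  rfl

theorem pvB_fold (xs : List String) :
    (∀ res : List String,
      (xs.foldl (fun st s =>
        if PySem.Str.count s "\"" % 2 ≠ 0 then
          match st.2 with
          | none => (st.1 ++ [s], some st.1.length)
          | some k => (st.1.set k (st.1.getD k "" ++ "," ++ s), none)
        else (st.1 ++ [s], st.2)) (res, (none : Option Nat))).1 = res ++ pvMerge xs) ∧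
    (∀ (res mid : List String) (s : String),
      (xs.foldl (fun st s =>
        if PySem.Str.count s "\"" % 2 ≠ 0 then
          match st.2 with
          | none => (st.1 ++ [s], some st.1.length)
          | some k => (st.1.set k (st.1.getD k "" ++ "," ++ s), none)
        else (st.1 ++ [s], st.2)) (res ++ s :: mid, some res.length)).1
        = res ++ pvMergeOpen s mid xs) := by
  induction xs with
  | nil => constructor <;> intros <;> simp [pvMerge, pvMergeOpen]
  | cons u rest ih =>
    constructor
    · intro res
      rw [List.foldl_cons]
      by_cases hu : PySem.Str.count u "\"" % 2 ≠ 0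
      · rw [if_pos hu]
        rw [ih.2 res [] u, pvMerge, if_pos hu]
      · rw [if_neg hu]
        rw [ih.1 (res ++ [u]), pvMerge, if_neg hu]
        simp
    · intro res mid s
      rw [List.foldl_cons]
      by_cases hu : PySem.Str.count u "\"" % 2 ≠ 0
      · rw [if_pos hu]
        simp only []
        have hg : (res ++ s :: mid).getD res.length "" = s := by
          rw [List.getD_eq_getElem?_getD, List.getElem?_append_right (le_refl _)]
          simp
        have hset : (res ++ s :: mid).set res.length (s ++ "," ++ u)
            = res ++ (s ++ "," ++ u) :: mid := by
          rw [List.set_append_right _ _ (le_refl _)]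
          simp
        rw [hg, hset, ih.1 (res ++ (s ++ "," ++ u) :: mid), pvMergeOpen, if_pos hu]
        simp
      · rw [if_neg hu]
        rw [show (res ++ s :: mid) ++ [u] = res ++ s :: (mid ++ [u]) by simp]
        rw [ih.2 res (mid ++ [u]) s, pvMergeOpen, if_neg hu]

theorem pvB_eq (x : List String) : repairQuotes_alt x = pvMerge x := by
  unfold repairQuotes_alt
  rw [(pvB_fold x).1 []]
  simp

-- ===== VERDICT (by name: the statement is the Claim_ definition above) =====
theorem repairQuotes_spec : Claim_equal_repairQuotes := by
  intro x _
  unfold Spec_repairQuotes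
  rw [pvA_eq, pvB_eq]
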